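-- pv_equiv track=rewrite | github.com/ajscolaro/sky-governance-companion | scripts/build-index.py | build_ancestors
-- ===== SOURCE A (Python) =====
-- def build_ancestors(number: str, doc_type: str) -> list[str]:
--     """Build the ancestor path prefixes for a document number.
--
--     For regular docs like A.6.1.1.2, ancestors are: [A.6, A.6.1, A.6.1.1]
--     For supporting docs, we go up to the target/controller document.
--     """
--     if number.startswith("NR-"):
--         return []
--
--     segments = number.split(".")
--     ancestors = []
--     # Build prefixes from A.X up to (but not including) the full number
--     for i in range(2, len(segments)):
--         ancestors.append(".".join(segments[:i]))
--     return ancestors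
-- ===== SOURCE B (Python) =====
-- def build_ancestors(number: str, doc_type: str) -> list[str]:
--     """Same result as A, but keeps one running prefix string instead of
--     re-joining segments[:i] on every iteration (O(n) total vs O(n^2))."""
--     if number.startswith("NR-"):
--         return []
--     segments = number.split(".")
--     if len(segments) < 2:
--         return []
--     ancestors = []
--     prefix = segments[0] + "." + segments[1]
--     for seg in segments[2:]:
--         ancestors.append(prefix)
--         prefix += "." + seg
--     return ancestors
-- ===== Notes on version B (the rewrite author's own statement) =====
-- stated objective: faster
-- what changed: Replaces the indexed loop that re-joins segments[:i] from scratch each iteration with a single pass over segments[2:] carrying one accumulated prefix string.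
import Mathlib
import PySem

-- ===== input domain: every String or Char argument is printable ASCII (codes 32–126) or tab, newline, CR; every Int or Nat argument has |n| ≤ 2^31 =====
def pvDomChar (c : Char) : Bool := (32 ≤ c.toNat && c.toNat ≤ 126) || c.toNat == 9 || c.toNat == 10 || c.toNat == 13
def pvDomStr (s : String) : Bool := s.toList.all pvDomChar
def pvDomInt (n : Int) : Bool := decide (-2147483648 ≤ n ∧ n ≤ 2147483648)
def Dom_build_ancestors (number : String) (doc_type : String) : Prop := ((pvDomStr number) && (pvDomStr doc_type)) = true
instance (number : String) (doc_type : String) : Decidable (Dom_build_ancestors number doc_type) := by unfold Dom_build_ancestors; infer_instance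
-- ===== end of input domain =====

-- B keeps one running prefix string instead of re-joining segments[:i] each iteration (objective: simpler/faster loop body).

-- ===== PORT A =====
def build_ancestors (number : String) (doc_type : String) : List String :=
  if PySem.Str.startswith number "NR-" = true then []
  else
    let segments := (PySem.Str.split? number ".").getD []   -- sep "." ≠ "", split? is always some
    (PySem.List.pyRange 2 (segments.length : Int) 1).foldl
      (fun ancestors i =>
        ancestors ++ [PySem.Str.join "." (PySem.List.slice segments none (some i))]) []

-- ===== PORT B =====
def build_ancestors_alt (number : String) (doc_type : String) : List String :=
  if PySem.Str.startswith number "NR-" = true then []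
  else
    match (PySem.Str.split? number ".").getD [] with
    | s0 :: s1 :: rest =>
        (rest.foldl
          (fun (st : List String × String) seg => (st.1 ++ [st.2], st.2 ++ "." ++ seg))
          ([], s0 ++ "." ++ s1)).1
    | _ => []

-- ===== PRECONDITION & SPEC =====
def Spec_build_ancestors (number : String) (doc_type : String) (out : List String) : Prop := out = build_ancestors_alt number doc_type
instance (number : String) (doc_type : String) (out : List String) : Decidable (Spec_build_ancestors number doc_type out) := by unfold Spec_build_ancestors; infer_instance

-- ===== CLAIM (what is proved, stated in full; the proofs are below) =====
def Claim_equal_build_ancestors : Prop := ∀ (number : String) (doc_type : String), Dom_build_ancestors number doc_type → Spec_build_ancestors number doc_type (build_ancestors number doc_type)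

-- ===== LEMMAS AND PROOFS =====

-- the sequence of running prefixes B emits, as a recursion
def pvAux (p : String) : List String → List String
  | [] => []
  | s :: r => p :: pvAux (p ++ "." ++ s) r

-- B's foldl over a pair computes pvAux
theorem pv_foldl_aux (rest : List String) (acc : List String) (p : String) :
    (rest.foldl
      (fun (st : List String × String) seg => (st.1 ++ [st.2], st.2 ++ "." ++ seg))
      (acc, p)).1 = acc ++ pvAux p rest := by
  induction rest generalizing acc p with
  | nil => simp [pvAux]
  | cons s r ih => simp [List.foldl, pvAux, ih]

-- join with a growing prefix: Str.join "." (a :: b :: l) peels to (a ++ "." ++ b) on the left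
theorem pv_join_cons_cons (a b : String) (l : List String) :
    PySem.Str.join "." (a :: b :: l) = PySem.Str.join "." ((a ++ "." ++ b) :: l) := by
  cases l with
  | nil =>
    simp [PySem.Str.join, PySem.Chars.join, List.intercalate]
  | cons c r =>
    simp only [PySem.Str.join, List.map_cons, PySem.Chars.join_cons_cons]
    congr 1
    simp [String.toList_append]

-- Str.join of a singleton
theorem pv_join_singleton (a : String) : PySem.Str.join "." [a] = a := by
  simp [PySem.Str.join, PySem.Chars.join, List.intercalate]

-- pvAux p rest lists the joins of all proper prefixes
theorem pv_aux_eq_map (rest : List String) (p : String) :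
    pvAux p rest =
      (List.range rest.length).map (fun k => PySem.Str.join "." (p :: rest.take k)) := by
  induction rest generalizing p with
  | nil => simp [pvAux]
  | cons s r ih =>
    simp only [pvAux, List.length_cons, List.range_succ_eq_map, List.map_cons, List.map_map]
    congr 1
    · simp [pv_join_singleton]
    · rw [ih (p ++ "." ++ s)]
      apply List.map_congr_left
      intro k _
      simp only [Function.comp, List.take_succ_cons]
      exact (pv_join_cons_cons p s (r.take k)).symm

-- the main bridge: A's indexed loop equals B's running-prefix loop, for any segment list
theorem pv_main (segments : List String) :
    (PySem.List.pyRange 2 (segments.length : Int) 1).foldl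
      (fun ancestors i =>
        ancestors ++ [PySem.Str.join "." (PySem.List.slice segments none (some i))]) []
    = match segments with
      | s0 :: s1 :: rest =>
          (rest.foldl
            (fun (st : List String × String) seg => (st.1 ++ [st.2], st.2 ++ "." ++ seg))
            ([], s0 ++ "." ++ s1)).1
      | _ => [] := by
  match segments with
  | [] => simp [PySem.List.pyRange_one_eq_nil]
  | [s0] => simp [PySem.List.pyRange_one_eq_nil]
  | s0 :: s1 :: rest =>
    show _ = (rest.foldl
      (fun (st : List String × String) seg => (st.1 ++ [st.2], st.2 ++ "." ++ seg))
      ([], s0 ++ "." ++ s1)).1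
    rw [pv_foldl_aux rest [] (s0 ++ "." ++ s1), List.nil_append,
        pv_aux_eq_map rest (s0 ++ "." ++ s1),
        PySem.List.foldl_append_singleton_eq_map, List.nil_append]
    have hlen : ((s0 :: s1 :: rest).length : Int) = 2 + rest.length := by
      simp; omega
    have hm : ((2 : Int) + (rest.length : Int) - 2).toNat = rest.length := by omega
    rw [hlen, PySem.List.pyRange_one, hm, List.map_map]
    apply List.map_congr_left
    intro k _
    simp only [Function.comp]
    have h2k : (2 : Int) + k = ((k + 2 : Nat) : Int) := by push_cast; ring
    rw [h2k, PySem.List.slice_to_natCast]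
    have : (s0 :: s1 :: rest).take (k + 2) = s0 :: s1 :: rest.take k := by
      simp [List.take_succ_cons]
    rw [this, pv_join_cons_cons]

-- ===== VERDICT (by name: the statement is the Claim_ definition above) =====
theorem build_ancestors_spec : Claim_equal_build_ancestors := by
  intro number doc_type _
  unfold Spec_build_ancestors build_ancestors build_ancestors_alt
  split_ifs with h
  · rfl
  · exact pv_main _
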